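-- pv_equiv track=rewrite | github.com/drustanyjt/t5-for-sparql | src/serve.py | unmask
-- ===== SOURCE A (Python) =====
-- def unmask(masked_query: str, vocab_dict: dict):
--
--     masked_query = masked_query.replace(">", "> ").replace("<", " <")
--     tokens_to_remove = ["<pad>", "</s>", "<unk>", "<s>"]
--     for token in tokens_to_remove:
--         masked_query = masked_query.replace(token, "")
--     masked_query_list = masked_query.strip().split()
--
--     for i in range(len(masked_query_list)):
--         if masked_query_list[i] in vocab_dict:
--             masked_query_list[i] = vocab_dict[masked_query_list[i]]
--
--     unmasked_query = " ".join(masked_query_list)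
--
--
--     return unmasked_query
-- ===== SOURCE B (Python) =====
-- def unmask(masked_query: str, vocab_dict: dict):
--     REMOVE = {'<pad>', '</s>', '<unk>', '<s>'}
--     spaced = ''.join('> ' if c == '>' else ' <' if c == '<' else c
--                      for c in masked_query)
--     return ' '.join(vocab_dict.get(t, t)
--                     for t in spaced.split() if t not in REMOVE)
-- ===== Notes on version B (the rewrite author's own statement) =====
-- stated objective: simpler
-- what changed: Replaces A's six whole-string substring-rewriting passes (two spacing replaces, four marker-removal replaces) plus an index-mutation loop over the token list with one per-character spacing pass and a single fused token pass (set-membership filter + dict.get mapping); marker removal moves from substring level to token level, which is equivalent because the spacing makes every marker a standalone token.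
import Mathlib
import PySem

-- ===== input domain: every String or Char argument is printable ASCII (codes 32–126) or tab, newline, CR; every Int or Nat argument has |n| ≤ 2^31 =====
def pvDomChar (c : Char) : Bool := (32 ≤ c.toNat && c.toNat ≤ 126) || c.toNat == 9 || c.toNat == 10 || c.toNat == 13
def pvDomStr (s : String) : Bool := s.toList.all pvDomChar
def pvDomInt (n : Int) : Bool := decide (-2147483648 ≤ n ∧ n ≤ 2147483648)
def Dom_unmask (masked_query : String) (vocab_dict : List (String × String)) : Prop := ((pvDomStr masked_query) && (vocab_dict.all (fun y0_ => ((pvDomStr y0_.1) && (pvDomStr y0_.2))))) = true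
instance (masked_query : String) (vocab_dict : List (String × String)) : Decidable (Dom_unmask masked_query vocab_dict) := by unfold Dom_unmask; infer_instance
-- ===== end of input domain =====

-- B replaces A's six whole-string substring passes (two spacing replaces, four marker removals)
-- and index-mutation loop by one per-character spacing pass and one fused token pass
-- (set filter + dict lookup); objective: simpler. Return values proved equal on the whole domain.

-- ===== PORT A =====
def unmask (masked_query : String) (vocab_dict : List (String × String)) : String :=
  let d := PySem.Dict.ofList vocab_dict
  let mq1 := PySem.Str.replace (PySem.Str.replace masked_query ">" "> ") "<" " <"
  let tokens_to_remove : List String := ["<pad>", "</s>", "<unk>", "<s>"]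
  let mq2 := tokens_to_remove.foldl (fun m tok => PySem.Str.replace m tok "") mq1
  let lst := PySem.Str.split₀ (PySem.Str.strip mq2)
  let lst2 := (PySem.List.pyRange 0 (PySem.List.len lst) 1).foldl
      (fun l i =>
        if d.contains (PySem.List.pyGetD l i "") then
          PySem.List.pySetD l i (d.getD (PySem.List.pyGetD l i "") "")
        else l) lst
  PySem.Str.join " " lst2

-- ===== PORT B =====
def unmask_alt (masked_query : String) (vocab_dict : List (String × String)) : String :=
  let d := PySem.Dict.ofList vocab_dict
  let remove : PySem.Set String := PySem.Set.ofList ["<pad>", "</s>", "<unk>", "<s>"]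
  let spaced := PySem.Str.join "" (masked_query.toList.map
      (fun c => if c = '>' then "> " else if c = '<' then " <" else String.ofList [c]))
  PySem.Str.join " "
    (((PySem.Str.split₀ spaced).filter (fun t => !(PySem.Set.contains remove t))).map
      (fun t => (d.get? t).getD t))

-- ===== PRECONDITION & SPEC =====
def Spec_unmask (masked_query : String) (vocab_dict : List (String × String)) (out : String) : Prop := out = unmask_alt masked_query vocab_dict
instance (masked_query : String) (vocab_dict : List (String × String)) (out : String) : Decidable (Spec_unmask masked_query vocab_dict out) := by unfold Spec_unmask; infer_instance

-- ===== CLAIM (what is proved, stated in full; the proofs are below) =====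
def Claim_equal_unmask : Prop := ∀ (masked_query : String) (vocab_dict : List (String × String)), Dom_unmask masked_query vocab_dict → Spec_unmask masked_query vocab_dict (unmask masked_query vocab_dict)

-- ===== LEMMAS AND PROOFS =====

-- Simple structural models of PySem's accumulator-based split₀/replace, used only in the proofs.

/-- `split()` without accumulators: `cur` is the reversed current word. -/
def pvSplitA : List Char → List Char → List (List Char)
  | [], cur => if cur.isEmpty then [] else [cur.reverse]
  | c :: rest, cur =>
    if PySem.Chars.isspace c then
      if cur.isEmpty then pvSplitA rest [] else cur.reverse :: pvSplitA rest []
    else pvSplitA rest (c :: cur)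

/-- `replace` with a nonempty pattern `o :: os`, structurally recursive. -/
def pvRep (o : Char) (os new : List Char) : List Char → List Char
  | [] => []
  | c :: t =>
    if (o :: os).isPrefixOf (c :: t) then new ++ pvRep o os new (t.drop os.length)
    else c :: pvRep o os new t
  termination_by s => s.length
  decreasing_by
  · simp only [List.length_drop, List.length_cons]
    omega
  · simp

/-- Invariant of the spaced string: `p` says "the previous char was `' '` (or string start)".
Every `'<'` must follow a `' '`, every `'>'` must be followed by a `' '`. -/
def pvGood (p : Bool) : List Char → Prop
  | [] => True
  | c :: t => (c = '<' → p = true) ∧ (c = '>' → t.head? = some ' ') ∧ pvGood (c == ' ') t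

/-- The per-character spacing A's first two replaces perform. -/
def pvSp (c : Char) : List Char :=
  if c = '>' then ['>', ' '] else if c = '<' then [' ', '<'] else [c]

-- ---- bridges from PySem's accumulator recursions to the models ----

theorem pvSplit_go_eq (s cur acc) :
    PySem.Chars.split₀.go s cur acc = acc.reverse ++ pvSplitA s cur := by
  induction s generalizing cur acc with
  | nil => simp [PySem.Chars.split₀.go, pvSplitA]; split <;> simp
  | cons c rest ih =>
    simp only [PySem.Chars.split₀.go, pvSplitA]
    split
    · split
      · simp [ih]
      · simp [ih]
    · simp [ih]

theorem pvSplit_eq (s : List Char) : PySem.Chars.split₀ s = pvSplitA s [] := by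
  simpa using pvSplit_go_eq s [] []

theorem pvRep_go_eq (o : Char) (os new : List Char) :
    ∀ (fuel : Nat) (l acc : List Char), l.length ≤ fuel →
    PySem.Chars.replace.go (o :: os) new fuel l acc = acc.reverse ++ pvRep o os new l := by
  intro fuel
  induction fuel with
  | zero =>
    intro l acc h
    have : l = [] := List.eq_nil_of_length_eq_zero (Nat.le_zero.mp h)
    subst this
    simp [PySem.Chars.replace.go, pvRep]
  | succ n ih =>
    intro l acc h
    match l with
    | [] => simp [PySem.Chars.replace.go, pvRep]
    | c :: t =>
      rw [PySem.Chars.replace.go]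
      rw [pvRep]
      split
      · rw [ih]
        · simp
        · simp only [List.length_drop, List.length_cons] at h ⊢
          omega
      · rw [ih _ _ (Nat.le_of_succ_le_succ h)]
        simp

theorem pvRep_eq (s : List Char) (o : Char) (os new : List Char) :
    PySem.Chars.replace s (o :: os) new = pvRep o os new s := by
  rw [PySem.Chars.replace]
  simp only [List.isEmpty_cons, Bool.false_eq_true, if_false]
  simpa using pvRep_go_eq o os new s.length s [] (le_refl _)

-- ---- the spacing stage ----

theorem pvRep_single (o : Char) (new : List Char) (s : List Char) :
    pvRep o [] new s = s.flatMap (fun c => if c = o then new else [c]) := by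
  induction s with
  | nil => simp [pvRep]
  | cons c t ih =>
    rw [pvRep]
    by_cases h : c = o
    · subst h
      simp [List.isPrefixOf, ih]
    · simp [List.isPrefixOf, Ne.symm h, h, ih]

theorem pvSpaced_eq (s : List Char) :
    pvRep '<' [] [' ', '<'] (pvRep '>' [] ['>', ' '] s) = s.flatMap pvSp := by
  rw [pvRep_single, pvRep_single, List.flatMap_assoc]
  have hf : (fun x => (if x = '>' then ['>', ' '] else [x]).flatMap
      (fun c => if c = '<' then [' ', '<'] else [c])) = pvSp := by
    funext c
    by_cases h1 : c = '>'
    · subst h1; simp [pvSp]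
    · by_cases h2 : c = '<' <;> simp [pvSp, h1, h2]
  rw [hf]

theorem pvGood_spaced (s : List Char) (p : Bool) : pvGood p (s.flatMap pvSp) := by
  induction s generalizing p with
  | nil => trivial
  | cons c t ih =>
    show pvGood p (pvSp c ++ t.flatMap pvSp)
    by_cases h1 : c = '>'
    · subst h1
      show pvGood p ('>' :: ' ' :: t.flatMap pvSp)
      exact ⟨fun h => absurd h (by decide), fun _ => rfl,
        fun h => absurd h (by decide), fun h => absurd h (by decide), ih true⟩
    · by_cases h2 : c = '<'
      · subst h2
        show pvGood p (' ' :: '<' :: t.flatMap pvSp)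
        exact ⟨fun h => absurd h (by decide), fun h => absurd h (by decide),
          fun _ => rfl, fun h => absurd h (by decide), ih false⟩
      · have hsp : pvSp c = [c] := by simp [pvSp, h1, h2]
        rw [hsp, List.singleton_append]
        exact ⟨fun h => absurd h h2, fun h => absurd h h1, ih (c == ' ')⟩

-- ---- generic facts about pvGood ----

theorem pvGood_irrel {t : List Char} (h : t.head? ≠ some '<') {p q : Bool}
    (hg : pvGood p t) : pvGood q t := by
  cases t with
  | nil => trivial
  | cons c rest =>
    exact ⟨fun hc => absurd (hc ▸ rfl) h, hg.2.1, hg.2.2⟩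

theorem pvGood_last_gt : ∀ (a : List Char), a ≠ [] → a.getLast? = some '>' →
    ∀ (p : Bool) (u : List Char), pvGood p (a ++ u) → u.head? = some ' ' := by
  intro a
  induction a with
  | nil => intro h; exact absurd rfl h
  | cons c a' ih =>
    intro _ hlast p u hg
    cases a' with
    | nil =>
      simp at hlast
      subst hlast
      exact hg.2.1 rfl
    | cons b a'' =>
      exact ih (by simp) (by simpa using hlast) _ u hg.2.2

theorem pvGood_congr_append : ∀ (a : List Char) (p : Bool) (u v : List Char),
    u.head? = v.head? → (∀ q, pvGood q u → pvGood q v) →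
    pvGood p (a ++ u) → pvGood p (a ++ v) := by
  intro a
  induction a with
  | nil => intro p u v _ hq hg; exact hq p hg
  | cons c a' ih =>
    intro p u v hh hq hg
    refine ⟨hg.1, ?_, ih _ u v hh hq hg.2.2⟩
    intro hc
    have h2 := hg.2.1 hc
    cases a' with
    | nil => simpa [← hh] using h2
    | cons b a'' => simpa using h2

-- ---- facts about pvSplitA ----

theorem pvSplitA_ws : ∀ (ws cur : List Char), (∀ c ∈ ws, PySem.Chars.isspace c = true) →
    pvSplitA ws cur = if cur.isEmpty then [] else [cur.reverse] := by
  intro ws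
  induction ws with
  | nil => intro cur _; rfl
  | cons w ws' ih =>
    intro cur h
    rw [pvSplitA, if_pos (h w (by simp))]
    have h0 : pvSplitA ws' [] = [] := by simpa using ih [] (fun c hc => h c (by simp [hc]))
    split <;> simp [h0]

theorem pvSplitA_append_ws : ∀ (s ws cur : List Char),
    (∀ c ∈ ws, PySem.Chars.isspace c = true) →
    pvSplitA (s ++ ws) cur = pvSplitA s cur := by
  intro s
  induction s with
  | nil =>
    intro ws cur h
    rw [List.nil_append, pvSplitA_ws ws cur h, pvSplitA]
  | cons c s' ih =>
    intro ws cur h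
    rw [List.cons_append, pvSplitA, pvSplitA]
    split
    · split <;> rw [ih ws [] h]
    · rw [ih ws _ h]

theorem pvSplitA_strip (x : List Char) :
    pvSplitA (PySem.Chars.strip x) [] = pvSplitA x [] := by
  unfold PySem.Chars.strip PySem.Chars.rstrip PySem.Chars.lstrip
  have lstrip : ∀ (z : List Char),
      pvSplitA (List.dropWhile PySem.Chars.isspace z) [] = pvSplitA z [] := by
    intro z
    induction z with
    | nil => rfl
    | cons c t ih =>
      by_cases h : PySem.Chars.isspace c
      · rw [List.dropWhile_cons_of_pos h, ih, pvSplitA, if_pos h]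
        simp
      · rw [List.dropWhile_cons_of_neg h]
  set y := List.dropWhile PySem.Chars.isspace x with hy
  have hdecomp : y = (List.dropWhile PySem.Chars.isspace y.reverse).reverse
      ++ (List.takeWhile PySem.Chars.isspace y.reverse).reverse := by
    rw [← List.reverse_append, List.takeWhile_append_dropWhile, List.reverse_reverse]
  calc pvSplitA (List.dropWhile PySem.Chars.isspace y.reverse).reverse []
      = pvSplitA ((List.dropWhile PySem.Chars.isspace y.reverse).reverse
          ++ (List.takeWhile PySem.Chars.isspace y.reverse).reverse) [] := by
        rw [pvSplitA_append_ws]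
        intro c hc
        exact List.mem_takeWhile_imp (l := y.reverse) (p := PySem.Chars.isspace)
          (by simpa using hc)
    _ = pvSplitA y [] := by rw [← hdecomp]
    _ = pvSplitA x [] := lstrip x

theorem pvSplitA_token : ∀ (tok cur u : List Char),
    (∀ c ∈ tok, PySem.Chars.isspace c = false) →
    (u = [] ∨ ∃ w t', u = w :: t' ∧ PySem.Chars.isspace w = true) →
    cur.reverse ++ tok ≠ [] →
    pvSplitA (tok ++ u) cur = (cur.reverse ++ tok) :: pvSplitA u [] := by
  intro tok
  induction tok with
  | nil =>
    intro cur u _ hu hne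
    simp only [List.append_nil] at hne
    have hcur : cur.isEmpty = false := by
      cases cur <;> simp at hne ⊢
    rcases hu with rfl | ⟨w, t', rfl, hw⟩
    · rw [List.nil_append, pvSplitA, if_neg (by simp [hcur])]
      simp [pvSplitA]
    · rw [List.nil_append, pvSplitA, if_pos hw, if_neg (by simp [hcur]),
        pvSplitA, if_pos hw]
      simp
  | cons c tok' ih =>
    intro cur u h hu hne
    rw [List.cons_append, pvSplitA, if_neg (by simp [h c (by simp)])]
    rw [ih (c :: cur) u (fun x hx => h x (by simp [hx])) hu (by simp)]
    simp

theorem pvSplitA_space {c : Char} (h : PySem.Chars.isspace c = true) (u : List Char) :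
    pvSplitA (c :: u) [] = pvSplitA u [] := by
  rw [pvSplitA, if_pos h]
  simp

theorem pvGood_append_elim : ∀ (a : List Char) (p : Bool) (u : List Char),
    pvGood p (a ++ u) → ∃ q, pvGood q u := by
  intro a
  induction a with
  | nil => intro p u hg; exact ⟨p, hg⟩
  | cons c a' ih => intro p u hg; exact ih _ u hg.2.2

-- ---- the core: token-aligned substring removal = token filtering ----

/-- Occurrences of the marker cannot begin inside a token (a `'<'` would have to follow `' '`). -/
theorem pvRep_pass (ms : List Char) : ∀ (tok u : List Char),
    (∀ c ∈ tok, PySem.Chars.isspace c = false) → pvGood false (tok ++ u) →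
    pvRep '<' ms [] (tok ++ u) = tok ++ pvRep '<' ms [] u := by
  intro tok
  induction tok with
  | nil => intro u _ _; rfl
  | cons c tok' ih =>
    intro u h hg
    have hc : c ≠ '<' := fun hx => by simpa using hg.1 hx
    rw [List.cons_append, pvRep,
      if_neg (by simp only [List.isPrefixOf, Bool.and_eq_true, beq_iff_eq]; rintro ⟨h', -⟩; exact hc h'.symm)]
    have hcs : (c == ' ') = false := by
      have hx := h c (by simp)
      by_cases hy : c = ' '
      · rw [hy] at hx; exact absurd hx (by decide)
      · simp [hy]
    have hg' : pvGood false (tok' ++ u) := by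
      have hz := hg.2.2; rwa [hcs] at hz
    rw [ih u (fun x hx => h x (by simp [hx])) hg']
    simp

theorem pvCore (ms : List Char) (hlast : ms.getLast? = some '>')
    (hns : ∀ c ∈ '<' :: ms, PySem.Chars.isspace c = false)
    (hlt : ∀ c ∈ ms, c ≠ '<') :
    ∀ (n : Nat) (s : List Char), s.length ≤ n → ∀ (p : Bool), pvGood p s →
      pvGood p (pvRep '<' ms [] s) ∧
      (∀ c, s.head? = some c → PySem.Chars.isspace c = true →
        (pvRep '<' ms [] s).head? = some c) ∧
      pvSplitA (pvRep '<' ms [] s) [] =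
        (pvSplitA s []).filter (fun tk => decide (tk ≠ '<' :: ms)) := by
  intro n
  induction n with
  | zero =>
    intro s hs p hg
    have : s = [] := List.eq_nil_of_length_eq_zero (Nat.le_zero.mp hs)
    subst this
    exact ⟨by rw [show pvRep '<' ms [] [] = [] from by simp [pvRep]]; trivial,
      by simp, by simp [pvRep, pvSplitA]⟩
  | succ n ih =>
    intro s hs p hg
    match s with
    | [] => exact ⟨by rw [show pvRep '<' ms [] [] = [] from by simp [pvRep]]; trivial,
        by simp, by simp [pvRep, pvSplitA]⟩
    | c :: t =>
      have ht : t.length ≤ n := by simpa using hs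
      by_cases hsp : PySem.Chars.isspace c = true
      · -- whitespace head: the marker cannot start here
        have hc : c ≠ '<' := fun h => by rw [h] at hsp; exact absurd hsp (by decide)
        have hngt : c ≠ '>' := fun h => by rw [h] at hsp; exact absurd hsp (by decide)
        rw [pvRep,
          if_neg (by simp only [List.isPrefixOf, Bool.and_eq_true, beq_iff_eq]; rintro ⟨h', -⟩; exact hc h'.symm)]
        obtain ⟨ihg, ihh, ihs⟩ := ih t ht (c == ' ') hg.2.2
        refine ⟨⟨hg.1, fun h => absurd h hngt, ihg⟩, ?_, ?_⟩
        · intro c' hc' _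
          simp only [List.head?_cons, Option.some.injEq] at hc'
          simp [hc']
        · rw [pvSplitA_space hsp, pvSplitA_space hsp, ihs]
      · by_cases hpre : ('<' :: ms).isPrefixOf (c :: t) = true
        · -- a marker occurrence starts exactly here
          obtain ⟨u, hu⟩ := List.isPrefixOf_iff_prefix.mp hpre
          rw [List.cons_append] at hu
          obtain ⟨hcc, htm⟩ : c = '<' ∧ ms ++ u = t := by
            rw [List.cons_eq_cons] at hu
            exact ⟨hu.1.symm, hu.2⟩
          subst hcc
          subst htm
          have hms : ms ≠ [] := fun h => by rw [h] at hlast; simp at hlast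
          have hlast' : ('<' :: ms).getLast? = some '>' := by
            cases ms with
            | nil => exact absurd rfl hms
            | cons m0 ms' => rw [List.getLast?_cons_cons]; exact hlast
          have hg' : pvGood p (('<' :: ms) ++ u) := by
            rw [List.cons_append]; exact hg
          have hw : u.head? = some ' ' := pvGood_last_gt ('<' :: ms) (by simp) hlast' p u hg'
          obtain ⟨q0, hq0⟩ := pvGood_append_elim ('<' :: ms) p u hg'
          have hgu : ∀ r, pvGood r u := fun r =>
            pvGood_irrel (by rw [hw]; simp) hq0
          rw [pvRep, if_pos hpre, List.nil_append, List.drop_left]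
          have hu_len : u.length ≤ n := by
            simp only [List.length_cons, List.length_append] at hs
            omega
          obtain ⟨ihg, ihh, ihs⟩ := ih u hu_len false (hgu false)
          have hhead : (pvRep '<' ms [] u).head? = some ' ' := ihh ' ' hw (by decide)
          refine ⟨?_, ?_, ?_⟩
          · exact pvGood_irrel (by rw [hhead]; simp) ihg
          · intro c' hc' hspc'
            simp only [List.head?_cons, Option.some.injEq] at hc'
            rw [← hc'] at hspc'
            exact absurd hspc' (by decide)
          · rw [ihs]
            have htok : pvSplitA (('<' :: ms) ++ u) [] = ('<' :: ms) :: pvSplitA u [] := by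
              apply pvSplitA_token
              · exact hns
              · rcases u with _ | ⟨w, u'⟩
                · simp at hw
                · right
                  refine ⟨w, u', rfl, ?_⟩
                  simp only [List.head?_cons, Option.some.injEq] at hw
                  rw [hw]; decide
              · simp
            rw [show ('<' :: (ms ++ u)) = ('<' :: ms) ++ u from rfl, htok]
            simp
        · -- inside an ordinary token: pass it through unchanged
          have hspf : PySem.Chars.isspace c = false := by simpa using hsp
          have hcs : (c == ' ') = false := by
            by_cases hy : c = ' '
            · rw [hy] at hspf; exact absurd hspf (by decide)
            · simp [hy]
          have hgt : pvGood false t := by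
            have hz := hg.2.2; rwa [hcs] at hz
          obtain ⟨tw, rest, htdec, htwns, hrsh⟩ :
              ∃ tw rest, t = tw ++ rest ∧ (∀ x ∈ tw, PySem.Chars.isspace x = false) ∧
                (rest = [] ∨ ∃ w t', rest = w :: t' ∧ PySem.Chars.isspace w = true) := by
            refine ⟨List.takeWhile (fun x => !PySem.Chars.isspace x) t,
              List.dropWhile (fun x => !PySem.Chars.isspace x) t,
              (List.takeWhile_append_dropWhile).symm, ?_, ?_⟩
            · intro x hx
              have := List.mem_takeWhile_imp hx
              simpa using this
            · cases hr : List.dropWhile (fun x => !PySem.Chars.isspace x) t with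
              | nil => left; rfl
              | cons w t' =>
                right
                refine ⟨w, t', rfl, ?_⟩
                have := List.head?_dropWhile_not (fun x => !PySem.Chars.isspace x) t
                rw [hr] at this
                simpa using this
          subst htdec
          have hrlen : rest.length ≤ n := by
            simp only [List.length_append] at ht
            omega
          obtain ⟨q0, hq0⟩ := pvGood_append_elim tw (c == ' ') rest hg.2.2
          obtain ⟨ihg, ihh, ihs⟩ := ih rest hrlen q0 hq0
          rw [pvRep, if_neg hpre]
          rw [pvRep_pass ms tw rest htwns hgt]
          have hRhead : (pvRep '<' ms [] rest).head? = rest.head? := by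
            rcases hrsh with hr | ⟨w, t', hr, hw⟩
            · rw [hr]; simp [pvRep]
            · have h1 := ihh w (by rw [hr]; rfl) hw
              rw [h1, hr]
              rfl
          refine ⟨?_, ?_, ?_⟩
          · refine ⟨hg.1, ?_, ?_⟩
            · intro hcgt
              have h' := hg.2.1 hcgt
              cases tw with
              | nil => simpa [hRhead] using h'
              | cons a b => simpa using h'
            · exact pvGood_congr_append tw _ rest (pvRep '<' ms [] rest) hRhead.symm
                (fun q hq => (ih rest hrlen q hq).1) hg.2.2
          · intro c' hc' hspc'
            simp only [List.head?_cons, Option.some.injEq] at hc'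
            rw [← hc'] at hspc'
            exact absurd hspc' (by simp [hspf])
          · have hRsh : pvRep '<' ms [] rest = [] ∨
                ∃ w t', pvRep '<' ms [] rest = w :: t' ∧ PySem.Chars.isspace w = true := by
              rcases hrsh with hr | ⟨w, t', hr, hw⟩
              · left; rw [hr]; simp [pvRep]
              · have h1 : (pvRep '<' ms [] rest).head? = some w := by
                  rw [hRhead, hr]; rfl
                cases hR : pvRep '<' ms [] rest with
                | nil => rw [hR] at h1; simp at h1
                | cons y ys =>
                  right
                  rw [hR] at h1
                  simp only [List.head?_cons, Option.some.injEq] at h1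
                  exact ⟨y, ys, rfl, h1 ▸ hw⟩
            have hL : pvSplitA ((c :: tw) ++ pvRep '<' ms [] rest) [] =
                (c :: tw) :: pvSplitA (pvRep '<' ms [] rest) [] := by
              apply pvSplitA_token
              · intro x hx
                rcases List.mem_cons.mp hx with rfl | hx'
                · exact hspf
                · exact htwns x hx'
              · exact hRsh
              · simp
            have hR : pvSplitA ((c :: tw) ++ rest) [] = (c :: tw) :: pvSplitA rest [] := by
              apply pvSplitA_token
              · intro x hx
                rcases List.mem_cons.mp hx with rfl | hx'
                · exact hspf
                · exact htwns x hx'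
              · exact hrsh
              · simp
            rw [show (c :: (tw ++ pvRep '<' ms [] rest)) = (c :: tw) ++ pvRep '<' ms [] rest from rfl,
              hL, ihs,
              show (c :: (tw ++ rest)) = (c :: tw) ++ rest from rfl, hR]
            have hne : (c :: tw) ≠ '<' :: ms := by
              intro heq
              exact absurd (List.isPrefixOf_iff_prefix.mpr
                ⟨rest, by rw [← heq]; simp⟩) hpre
            simp [hne]

-- ---- the vocabulary-mapping loop is a map ----

theorem pvLoop (d : PySem.Dict String String) (l : List String) :
    (PySem.List.pyRange 0 (PySem.List.len l) 1).foldl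
      (fun acc i =>
        if d.contains (PySem.List.pyGetD acc i "") then
          PySem.List.pySetD acc i (d.getD (PySem.List.pyGetD acc i "") "")
        else acc) l
    = l.map (fun t => (d.get? t).getD t) := by
  have key : ∀ (k : Nat), k ≤ l.length →
      ((List.range k).map (fun j : Nat => (j : Int))).foldl
        (fun acc i =>
          if d.contains (PySem.List.pyGetD acc i "") then
            PySem.List.pySetD acc i (d.getD (PySem.List.pyGetD acc i "") "")
          else acc) l
      = (l.take k).map (fun t => (d.get? t).getD t) ++ l.drop k := by
    intro k
    induction k with
    | zero => intro _; simp
    | succ k ihk =>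
      intro hk
      have hk' : k < l.length := hk
      rw [List.range_succ, List.map_append, List.foldl_append, ihk (Nat.le_of_lt hk')]
      simp only [List.map_cons, List.map_nil, List.foldl_cons, List.foldl_nil]
      have hlen : ((l.take k).map (fun t => (d.get? t).getD t)).length = k := by
        simp [Nat.min_eq_left (Nat.le_of_lt hk')]
      have hget : PySem.List.pyGetD
          ((l.take k).map (fun t => (d.get? t).getD t) ++ l.drop k) ((k : Nat) : Int) "" = l[k] := by
        rw [PySem.List.pyGetD_natCast]
        rw [List.getD_eq_getElem?_getD]
        rw [List.getElem?_append_right (by omega)]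
        rw [hlen]
        simp [hk']
      have hdrop : l.drop k = l[k] :: l.drop (k + 1) := List.drop_eq_getElem_cons hk'
      have hset : ∀ v, PySem.List.pySetD
          ((l.take k).map (fun t => (d.get? t).getD t) ++ l.drop k) ((k : Nat) : Int) v
          = (l.take k).map (fun t => (d.get? t).getD t) ++ v :: l.drop (k + 1) := by
        intro v
        rw [PySem.List.pySetD_natCast]
        simp only [List.set_append, hlen]
        rw [if_neg (by omega), Nat.sub_self, hdrop]
        rfl
      have htake : l.take (k + 1) = l.take k ++ [l[k]] := List.take_succ_eq_append_getElem hk'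
      rw [hget]
      by_cases hc : d.contains l[k] = true
      · rw [if_pos hc, hset]
        obtain ⟨v, hv⟩ : ∃ v, d.get? l[k] = some v := by
          have h2 := PySem.Dict.contains_eq_isSome_get? (d := d) (k := l[k])
          rw [hc] at h2
          exact Option.isSome_iff_exists.mp h2.symm
        rw [htake, List.map_append]
        simp [PySem.Dict.getD_eq_get?_getD, hv]
      · rw [if_neg (by simp [hc])]
        rw [htake, List.map_append, hdrop]
        have hnone : d.get? l[k] = none := by
          cases ho : d.get? l[k] with
          | none => rfl
          | some v =>
            exact absurd (by rw [PySem.Dict.contains_eq_isSome_get?, ho]; rfl) hc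
        simp [hnone]
  have hlen : PySem.List.len l = (l.length : Int) := by simp
  rw [hlen, PySem.List.pyRange_zero_natCast]
  have := key l.length (le_refl _)
  simpa using this


theorem pvJoin_nil (xs : List (List Char)) : PySem.Chars.join [] xs = xs.flatten := by
  unfold PySem.Chars.join
  induction xs with
  | nil => rfl
  | cons a t ih =>
    cases t with
    | nil => simp [List.intercalate]
    | cons b t' =>
      simp only [List.intercalate, List.intersperse] at *
      simpa using ih

theorem pvOfList_eq_iff (a : List Char) (b : String) : String.ofList a = b ↔ a = b.toList := by
  constructor
  · intro h; rw [← h, String.toList_ofList]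
  · intro h; rw [h]; exact String.ofList_toList

-- ---- assembly ----

set_option maxRecDepth 4096 in
set_option maxHeartbeats 1000000 in
theorem pvUnmask_eq (masked_query : String) (vocab_dict : List (String × String)) :
    unmask masked_query vocab_dict = unmask_alt masked_query vocab_dict := by
  unfold unmask unmask_alt
  simp only [List.foldl_cons, List.foldl_nil]
  -- the spaced character stream both sides produce
  have hA : (PySem.Str.replace (PySem.Str.replace masked_query ">" "> ") "<" " <").toList
      = masked_query.toList.flatMap pvSp := by
    rw [PySem.Str.toList_replace, PySem.Str.toList_replace]
    rw [show (">").toList = ['>'] from rfl, show ("> ").toList = ['>', ' '] from rfl,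
      show ("<").toList = ['<'] from rfl, show (" <").toList = [' ', '<'] from rfl]
    rw [pvRep_eq, pvRep_eq, pvSpaced_eq]
  have hB : (PySem.Str.join "" (masked_query.toList.map
      (fun c => if c = '>' then "> " else if c = '<' then " <" else String.ofList [c]))).toList
      = masked_query.toList.flatMap pvSp := by
    have hfun : (String.toList ∘ fun c => if c = '>' then "> " else if c = '<' then " <"
        else String.ofList [c]) = pvSp := by
      funext c
      simp only [Function.comp_apply]
      by_cases h1 : c = '>'
      · subst h1; rfl
      · by_cases h2 : c = '<'
        · subst h2; rfl
        · simp only [h1, h2, if_false, pvSp]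
          exact String.toList_ofList
    unfold PySem.Str.join
    rw [String.toList_ofList]
    rw [show ("").toList = ([] : List Char) from rfl, pvJoin_nil, List.map_map, hfun,
      List.flatMap_def]
  set sc := masked_query.toList.flatMap pvSp with hsc
  -- the four marker-removal stages, at the character level
  have g0 : pvGood true sc := pvGood_spaced masked_query.toList true
  obtain ⟨g1, -, s1⟩ := pvCore ['p','a','d','>'] (by decide) (by intro c hc; fin_cases hc <;> decide) (by intro c hc; fin_cases hc <;> decide)
    sc.length sc (le_refl _) true g0
  obtain ⟨g2, -, s2⟩ := pvCore ['/','s','>'] (by decide) (by intro c hc; fin_cases hc <;> decide) (by intro c hc; fin_cases hc <;> decide)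
    _ (pvRep '<' ['p','a','d','>'] [] sc) (le_refl _) true g1
  obtain ⟨g3, -, s3⟩ := pvCore ['u','n','k','>'] (by decide) (by intro c hc; fin_cases hc <;> decide) (by intro c hc; fin_cases hc <;> decide)
    _ (pvRep '<' ['/','s','>'] [] (pvRep '<' ['p','a','d','>'] [] sc)) (le_refl _) true g2
  obtain ⟨-, -, s4⟩ := pvCore ['s','>'] (by decide) (by intro c hc; fin_cases hc <;> decide) (by intro c hc; fin_cases hc <;> decide)
    _ (pvRep '<' ['u','n','k','>'] [] (pvRep '<' ['/','s','>'] []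
        (pvRep '<' ['p','a','d','>'] [] sc))) (le_refl _) true g3
  -- A's token list after removal and strip/split
  have hA2 : (PySem.Str.split₀ (PySem.Str.strip (PySem.Str.replace (PySem.Str.replace
        (PySem.Str.replace (PySem.Str.replace (PySem.Str.replace
          (PySem.Str.replace masked_query ">" "> ") "<" " <")
          "<pad>" "") "</s>" "") "<unk>" "") "<s>" "")))
      = ((pvSplitA sc []).filter (fun tk =>
          decide (tk ≠ '<' :: ['p','a','d','>']) && decide (tk ≠ '<' :: ['/','s','>']) &&
          decide (tk ≠ '<' :: ['u','n','k','>']) && decide (tk ≠ '<' :: ['s','>']))).map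
        String.ofList := by
    unfold PySem.Str.split₀
    rw [PySem.Str.toList_strip, pvSplit_eq, pvSplitA_strip]
    rw [PySem.Str.toList_replace, PySem.Str.toList_replace, PySem.Str.toList_replace,
      PySem.Str.toList_replace, hA]
    rw [show ("<pad>").toList = ['<','p','a','d','>'] from rfl,
      show ("</s>").toList = ['<','/','s','>'] from rfl,
      show ("<unk>").toList = ['<','u','n','k','>'] from rfl,
      show ("<s>").toList = ['<','s','>'] from rfl,
      show ("").toList = ([] : List Char) from rfl]
    rw [pvRep_eq, pvRep_eq, pvRep_eq, pvRep_eq]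
    rw [s4, s3, s2, s1]
    rw [List.filter_filter, List.filter_filter, List.filter_filter]
    refine congrArg (List.map String.ofList) ?_
    apply List.filter_congr
    intro tk _
    ac_rfl
  -- B's token list
  have hB2 : (PySem.Str.split₀ (PySem.Str.join "" (masked_query.toList.map
        (fun c => if c = '>' then "> " else if c = '<' then " <" else String.ofList [c])))).filter
        (fun t => !(PySem.Set.contains (PySem.Set.ofList ["<pad>", "</s>", "<unk>", "<s>"]) t))
      = ((pvSplitA sc []).filter (fun tk =>
          decide (tk ≠ '<' :: ['p','a','d','>']) && decide (tk ≠ '<' :: ['/','s','>']) &&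
          decide (tk ≠ '<' :: ['u','n','k','>']) && decide (tk ≠ '<' :: ['s','>']))).map
        String.ofList := by
    unfold PySem.Str.split₀
    rw [hB, pvSplit_eq, List.filter_map]
    refine congrArg (List.map String.ofList) ?_
    apply List.filter_congr
    intro tk _
    show (!(PySem.Set.contains (PySem.Set.ofList ["<pad>", "</s>", "<unk>", "<s>"])
      (String.ofList tk))) = _
    by_cases h1 : tk = '<' :: ['p','a','d','>']
    · subst h1; decide
    · by_cases h2 : tk = '<' :: ['/','s','>']
      · subst h2; decide
      · by_cases h3 : tk = '<' :: ['u','n','k','>']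
        · subst h3; decide
        · by_cases h4 : tk = '<' :: ['s','>']
          · subst h4; decide
          · have hc : PySem.Set.contains (PySem.Set.ofList ["<pad>", "</s>", "<unk>", "<s>"])
                (String.ofList tk) = false := by
              rw [← Bool.not_eq_true, PySem.Set.contains_iff]
              intro hmem
              have hor : String.ofList tk = "<pad>" ∨ String.ofList tk = "</s>" ∨
                  String.ofList tk = "<unk>" ∨ String.ofList tk = "<s>" := by
                simpa [PySem.Set.mem_ofList] using hmem
              rcases hor with h | h | h | h <;>
                first
                | exact h1 (by rw [pvOfList_eq_iff] at h; exact h)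
                | exact h2 (by rw [pvOfList_eq_iff] at h; exact h)
                | exact h3 (by rw [pvOfList_eq_iff] at h; exact h)
                | exact h4 (by rw [pvOfList_eq_iff] at h; exact h)
            simp only [hc, h1, h2, h3, h4, decide_not]
            simp
  rw [pvLoop, hA2, hB2]


-- ===== VERDICT (by name: the statement is the Claim_ definition above) =====
theorem unmask_spec : Claim_equal_unmask := by
  intro mq v _
  show _ = _
  exact pvUnmask_eq mq v
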